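-- pv_equiv track=rewrite | github.com/Boodoochai/My-Learning-Tracker | Online-Judge/Codeforces-Rounds/all_div_17_02_24/D.py | count_t
-- ===== SOURCE A (Python) =====
-- def count_t(l, r, a):
--     ind = l
--     ans = 0
--     while ind < r:
--         if a[ind] == 1:
--             ans += 1
--             ind += 2
--         ind += 1
--
--     return ans
-- ===== SOURCE B (Python) =====
-- def count_t(l, r, a):
--     ones = [i for i in range(l, r) if a[i] == 1]
--     ans = 0
--     next_allowed = l
--     for p in ones:
--         if p >= next_allowed:
--             ans += 1
--             next_allowed = p + 3
--     return ans
-- ===== Notes on version B (the rewrite author's own statement) =====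
-- stated objective: alternative
-- what changed: Replaces A's state-dependent index jump over the raw range (ind += 3 on a hit) with a two-phase pass: first collect all candidate positions with a[i]==1 in [l,r), then greedily select them against a next_allowed = p+3 cooldown threshold.
-- outside the precondition, e.g. on count_t(0, 3, [1, 0]): A returns 1, B raises IndexError
import Mathlib
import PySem

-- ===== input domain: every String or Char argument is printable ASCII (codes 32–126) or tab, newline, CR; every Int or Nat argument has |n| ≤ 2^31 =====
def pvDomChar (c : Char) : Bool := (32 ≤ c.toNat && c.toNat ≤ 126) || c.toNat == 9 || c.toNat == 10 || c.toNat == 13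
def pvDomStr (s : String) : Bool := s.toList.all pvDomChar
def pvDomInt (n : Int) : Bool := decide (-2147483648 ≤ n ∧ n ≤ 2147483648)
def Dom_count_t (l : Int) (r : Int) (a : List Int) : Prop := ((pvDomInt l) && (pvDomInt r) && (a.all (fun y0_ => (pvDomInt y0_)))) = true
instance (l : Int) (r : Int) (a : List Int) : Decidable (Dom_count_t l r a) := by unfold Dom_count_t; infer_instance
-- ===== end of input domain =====

-- B replaces A's jump-by-3 scan with a collect-candidates-then-greedy-select pass (alternative decomposition, same cost).


-- ===== PORT A =====
-- while-loop of A as recursion on the distance r - ind; the `none` (IndexError) branch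
-- is unreachable under Pre_count_t and returns the running ans.
def count_t_loop (r : Int) (a : List Int) (ind : Int) (ans : Int) : Int :=
  if ind < r then
    match PySem.List.pyGet? a ind with
    | some v =>
        if v = 1 then count_t_loop r a (ind + 3) (ans + 1)
        else count_t_loop r a (ind + 1) ans
    | none => ans
  else ans
termination_by (r - ind).toNat
decreasing_by all_goals omega

def count_t (l : Int) (r : Int) (a : List Int) : Int :=
  count_t_loop r a l 0

-- ===== PORT B =====
-- step of B's for-loop: state = (ans, next_allowed)
def count_t_step (st : Int × Int) (p : Int) : Int × Int :=
  if st.2 ≤ p then (st.1 + 1, p + 3) else st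

def count_t_alt (l : Int) (r : Int) (a : List Int) : Int :=
  let ones := (PySem.List.pyRange l r 1).filter (fun i => PySem.List.pyGet? a i == some 1)
  (ones.foldl count_t_step (0, l)).1

-- ===== PRECONDITION & SPEC =====
-- Pre_ excludes inputs where some index in [l,r) is outside Python's valid index range:
-- A's cooldown jump can skip such an index and still return, while B's comprehension
-- touches every index of range(l,r) and raises IndexError there.
def Pre_count_t (l : Int) (r : Int) (a : List Int) : Prop :=
  r ≤ l ∨ (-(a.length : Int) ≤ l ∧ r ≤ (a.length : Int))
instance (l : Int) (r : Int) (a : List Int) : Decidable (Pre_count_t l r a) := by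
  unfold Pre_count_t; infer_instance

def pvWitness_count_t : Int × Int × List Int := (0, 4, [1, 0, 1, 1])

def Spec_count_t (l : Int) (r : Int) (a : List Int) (out : Int) : Prop := out = count_t_alt l r a
instance (l : Int) (r : Int) (a : List Int) (out : Int) : Decidable (Spec_count_t l r a out) := by unfold Spec_count_t; infer_instance

-- ===== CLAIM (what is proved, stated in full; the proofs are below) =====
def Claim_equal_count_t : Prop := ∀ (l : Int) (r : Int) (a : List Int), Dom_count_t l r a → Pre_count_t l r a → Spec_count_t l r a (count_t l r a)

-- ===== LEMMAS AND PROOFS =====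

-- the ans component of B's fold is additive in its initial value
theorem count_t_fold_add (xs : List Int) (c na : Int) :
    xs.foldl count_t_step (c, na) =
      ((xs.foldl count_t_step (0, na)).1 + c, (xs.foldl count_t_step (0, na)).2) := by
  induction xs generalizing c na with
  | nil => simp
  | cons p xs ih =>
    simp only [List.foldl_cons, count_t_step]
    by_cases h : na ≤ p
    · simp only [if_pos h]
      rw [ih (c + 1) (p + 3), ih (0 + 1) (p + 3)]
      simp only [Prod.mk.injEq]
      exact ⟨by ring, trivial⟩
    · simp only [if_neg h]; exact ih c na

-- the answer ignores the exact initial threshold when all elements decide it the same way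
theorem count_t_fold_congr (xs : List Int) (c na na' : Int)
    (h : ∀ p ∈ xs, (na ≤ p) ↔ (na' ≤ p)) :
    (xs.foldl count_t_step (c, na)).1 = (xs.foldl count_t_step (c, na')).1 := by
  induction xs generalizing c na na' with
  | nil => rfl
  | cons p xs ih =>
    simp only [List.foldl_cons, count_t_step]
    by_cases hp : na ≤ p
    · rw [if_pos hp, if_pos ((h p (by simp)).1 hp)]
    · rw [if_neg hp, if_neg (fun hp' => hp ((h p (by simp)).2 hp'))]
      exact ih c na na' (fun q hq => h q (by simp [hq]))

-- elements all below the threshold leave the fold state unchanged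
theorem count_t_fold_skip (xs : List Int) (st : Int × Int)
    (h : ∀ p ∈ xs, p < st.2) : xs.foldl count_t_step st = st := by
  induction xs with
  | nil => rfl
  | cons p xs ih =>
    have hp : ¬ st.2 ≤ p := by have := h p (by simp); omega
    simp only [List.foldl_cons, count_t_step, if_neg hp]
    exact ih (fun q hq => h q (by simp [hq]))

-- greedy value of B, parametrised by the scan start
def count_t_G (r : Int) (a : List Int) (ind : Int) : Int :=
  (((PySem.List.pyRange ind r 1).filter
      (fun i => PySem.List.pyGet? a i == some 1)).foldl count_t_step (0, ind)).1

theorem count_t_loop_eq_G (r : Int) (a : List Int) (ind ans : Int)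
    (hidx : ∀ i, ind ≤ i → i < r → -(a.length : Int) ≤ i ∧ i < (a.length : Int)) :
    count_t_loop r a ind ans = ans + count_t_G r a ind := by
  by_cases h : ind < r
  · have hin := hidx ind le_rfl h
    obtain ⟨v, hv⟩ : ∃ v, PySem.List.pyGet? a ind = some v := by
      cases hx : PySem.List.pyGet? a ind with
      | none =>
          exact absurd (show PySem.Raise.InRange a.length ind from ⟨hin.1, hin.2⟩)
            ((PySem.List.pyGet?_eq_none_iff a ind).mp hx)
      | some v => exact ⟨v, rfl⟩
    rw [count_t_loop, if_pos h, hv]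
    by_cases hv1 : v = 1
    · subst hv1
      show (if (1 : Int) = 1 then count_t_loop r a (ind + 3) (ans + 1)
            else count_t_loop r a (ind + 1) ans) = ans + count_t_G r a ind
      rw [if_pos rfl,
          count_t_loop_eq_G r a (ind + 3) (ans + 1) (fun i hi hir => hidx i (by omega) hir)]
      have hG : count_t_G r a ind = 1 + count_t_G r a (ind + 3) := by
        unfold count_t_G
        rw [PySem.List.pyRange_one_cons h, List.filter_cons, if_pos (by simp [hv]),
            List.foldl_cons]
        have hstep : count_t_step (0, ind) ind = (1, ind + 3) := by
          simp [count_t_step]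
        rw [hstep]
        have hpre :
            ((PySem.List.pyRange (ind + 1) r 1).filter
                (fun i => PySem.List.pyGet? a i == some 1)).foldl count_t_step (1, ind + 3) =
            ((PySem.List.pyRange (ind + 3) r 1).filter
                (fun i => PySem.List.pyGet? a i == some 1)).foldl count_t_step (1, ind + 3) := by
          by_cases hr3 : ind + 3 ≤ r
          · rw [PySem.List.pyRange_one_append (ind + 1) (ind + 3) r (by omega) hr3,
                List.filter_append, List.foldl_append,
                count_t_fold_skip _ (1, ind + 3)
                  (fun p hp => by
                    have hm := PySem.List.mem_pyRange_one.mp (List.mem_of_mem_filter hp)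
                    exact hm.2)]
          · rw [PySem.List.pyRange_one_eq_nil (show r ≤ ind + 3 by omega),
                List.filter_nil, List.foldl_nil,
                count_t_fold_skip _ (1, ind + 3)
                  (fun p hp => by
                    have hm := PySem.List.mem_pyRange_one.mp (List.mem_of_mem_filter hp)
                    show p < ind + 3
                    omega)]
        rw [hpre, count_t_fold_add _ 1 (ind + 3)]
        simp
        omega
      omega
    · show (if v = 1 then count_t_loop r a (ind + 3) (ans + 1)
            else count_t_loop r a (ind + 1) ans) = ans + count_t_G r a ind
      rw [if_neg hv1,
          count_t_loop_eq_G r a (ind + 1) ans (fun i hi hir => hidx i (by omega) hir)]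
      have hG : count_t_G r a ind = count_t_G r a (ind + 1) := by
        unfold count_t_G
        rw [PySem.List.pyRange_one_cons h, List.filter_cons, if_neg (by simp [hv, hv1])]
        exact count_t_fold_congr _ 0 ind (ind + 1)
          (fun p hp => by
            have hm := PySem.List.mem_pyRange_one.mp (List.mem_of_mem_filter hp)
            omega)
      omega
  · rw [count_t_loop, if_neg h]
    unfold count_t_G
    rw [PySem.List.pyRange_one_eq_nil (by omega)]
    simp only [List.filter_nil, List.foldl_nil]
    omega
termination_by (r - ind).toNat
decreasing_by all_goals omega

-- ===== VERDICT (by name: the statement is the Claim_ definition above) =====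
theorem count_t_spec : Claim_equal_count_t := by
  intro l r a _ hpre
  unfold Spec_count_t count_t count_t_alt
  rcases hpre with h | ⟨h1, h2⟩
  · rw [count_t_loop_eq_G r a l 0 (fun i hi hir => by omega)]
    simp [count_t_G]
  · rw [count_t_loop_eq_G r a l 0 (fun i hi hir => ⟨by omega, by omega⟩)]
    simp [count_t_G]
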